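-- pv_equiv track=rewrite | github.com/MightyElemental/SoftwareOne | Week Eight/recursion.py | something_ish
-- ===== SOURCE A (Python) =====
-- def something_ish(pattern: str, word: str, flags: int = 0b0) -> bool:
--     if flags == 2**len(pattern)-1: return True
--     if len(word) <= 0: return False
--     try:
--         index = pattern.index(word[0])
--         flags |= 2**index
--     except ValueError: pass #if not in word, ignore
--     return something_ish(pattern, word[1:], flags)
-- ===== SOURCE B (Python) =====
-- def something_ish(pattern: str, word: str, flags: int = 0b0) -> bool:
--     # one pass: precompute first-occurrence index per char, OR the bits, compare once
--     first = {}
--     for i, c in enumerate(pattern):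
--         if c not in first:
--             first[c] = i
--     m = flags
--     for c in word:
--         if c in first:
--             m |= 2 ** first[c]
--     return m == 2 ** len(pattern) - 1
-- ===== Notes on version B (the rewrite author's own statement) =====
-- stated objective: faster
-- what changed: Replaced A's character-by-character recursion (which rescans the pattern with str.index for every word character and slices the word each step) by a dict of first-occurrence indices built once, a single bitmask-accumulating pass over the word, and one final comparison against the full mask.
import Mathlib
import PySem

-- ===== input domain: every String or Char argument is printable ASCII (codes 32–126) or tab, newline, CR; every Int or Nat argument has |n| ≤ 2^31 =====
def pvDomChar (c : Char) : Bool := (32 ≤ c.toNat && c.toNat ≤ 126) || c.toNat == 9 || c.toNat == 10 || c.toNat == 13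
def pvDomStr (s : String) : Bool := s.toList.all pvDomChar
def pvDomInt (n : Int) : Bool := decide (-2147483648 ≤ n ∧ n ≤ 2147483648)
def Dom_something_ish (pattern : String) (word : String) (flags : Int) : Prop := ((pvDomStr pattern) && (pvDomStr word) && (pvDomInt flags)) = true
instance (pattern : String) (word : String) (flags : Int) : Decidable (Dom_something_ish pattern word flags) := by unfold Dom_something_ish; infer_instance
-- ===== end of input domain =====

-- B replaces A's O(|word|*|pattern|) recursion (str.index per char) by a precomputed
-- first-occurrence dict and one pass over word (objective: faster, asymptotic).


-- ===== PORT A =====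
-- A's recursion on the word's characters; pattern.index(word[0]) on a single char is
-- exactly the first index of that char in pattern (PySem.List.index?).
def somethingGoA (p : List Char) (w : List Char) (flags : Int) : Bool :=
  if flags = 2 ^ p.length - 1 then true
  else
    match w with
    | [] => false
    | c :: rest =>
        match PySem.List.index? p c with
        | some i => somethingGoA p rest (PySem.Int.bor flags (2 ^ i))
        | none => somethingGoA p rest flags

def something_ish (pattern : String) (word : String) (flags : Int) : Bool :=
  somethingGoA pattern.toList word.toList flags

-- ===== PORT B =====
-- first = {}; for i, c in enumerate(pattern): if c not in first: first[c] = i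
def somethingFirstB (p : List Char) : PySem.Dict Char Int :=
  (PySem.List.enumerate p 0).foldl
    (fun d ic => if d.contains ic.2 then d else d.insert ic.2 ic.1) PySem.Dict.empty

def something_ish_alt (pattern : String) (word : String) (flags : Int) : Bool :=
  let first := somethingFirstB pattern.toList
  let m := word.toList.foldl
    (fun m c =>
      match first.get? c with
      | some i => PySem.Int.bor m (2 ^ i.toNat)   -- i ≥ 0: first-occurrence index
      | none => m) flags
  decide (m = 2 ^ pattern.toList.length - 1)

-- ===== PRECONDITION & SPEC =====
def Spec_something_ish (pattern : String) (word : String) (flags : Int) (out : Bool) : Prop := out = something_ish_alt pattern word flags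
instance (pattern : String) (word : String) (flags : Int) (out : Bool) : Decidable (Spec_something_ish pattern word flags out) := by unfold Spec_something_ish; infer_instance

-- ===== CLAIM (what is proved, stated in full; the proofs are below) =====
def Claim_equal_something_ish : Prop := ∀ (pattern : String) (word : String) (flags : Int), Dom_something_ish pattern word flags → Spec_something_ish pattern word flags (something_ish pattern word flags)

-- ===== LEMMAS AND PROOFS =====

-- the dict of first occurrences looks up exactly the first index in the pattern
theorem somethingFirst_aux (p : List Char) (s : Int) (d : PySem.Dict Char Int) (c : Char) :
    ((PySem.List.enumerate p s).foldl
      (fun d ic => if d.contains ic.2 then d else d.insert ic.2 ic.1) d).get? c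
    = (match d.get? c with
       | some v => some v
       | none => (PySem.List.index? p c).map (fun n => (n : Int) + s)) := by
  induction p generalizing s d with
  | nil =>
      rw [PySem.List.enumerate_nil]
      simp only [List.foldl_nil]
      cases d.get? c <;> simp
  | cons x rest ih =>
      rw [PySem.List.enumerate_cons]
      simp only [List.foldl_cons]
      rw [ih]
      by_cases hc : d.contains x = true
      · simp only [hc, if_true]
        cases hdc : d.get? c with
        | some v => simp
        | none =>
            have hcx : c ≠ x := by
              rintro rfl
              rw [PySem.Dict.contains_eq_isSome_get?, hdc] at hc
              simp at hc
            rw [PySem.List.index?_cons_of_ne rest (Ne.symm hcx)]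
            cases PySem.List.index? rest c <;> simp [Int.add_assoc, Int.add_comm 1 s]
      · simp only [hc, if_false, Bool.false_eq_true]
        rw [PySem.Dict.get?_insert]
        by_cases hcx : c = x
        · subst hcx
          have hdc : d.get? c = none := by
            rw [PySem.Dict.contains_eq_isSome_get?] at hc
            cases h : d.get? c
            · rfl
            · rw [h] at hc; simp at hc
          rw [if_pos rfl, hdc, PySem.List.index?_cons_self]
          simp
        · rw [if_neg hcx, PySem.List.index?_cons_of_ne rest (Ne.symm hcx)]
          cases d.get? c <;> cases PySem.List.index? rest c <;> simp [Int.add_assoc, Int.add_comm 1 s]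

theorem somethingFirst_get (p : List Char) (c : Char) :
    (somethingFirstB p).get? c = (PySem.List.index? p c).map (fun n => (n : Int)) := by
  unfold somethingFirstB
  rw [somethingFirst_aux]
  rw [PySem.Dict.get?_empty]
  cases PySem.List.index? p c <;> simp

-- ORing a bit below the top leaves the all-ones mask unchanged
theorem bor_full (n i : Nat) (h : i < n) :
    PySem.Int.bor ((2 : Int) ^ n - 1) (2 ^ i) = 2 ^ n - 1 := by
  have h1 : ((2 : Int) ^ n - 1) = (((2 ^ n - 1 : Nat)) : Int) := by
    push_cast [Nat.one_le_two_pow]; ring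
  have h2 : ((2 : Int) ^ i) = (((2 ^ i : Nat)) : Int) := by push_cast; ring
  rw [h1, h2, PySem.Int.bor_natCast]
  congr 1
  apply Nat.eq_of_testBit_eq
  intro j
  rcases Nat.lt_or_ge j n with hj | hj
  · simp [Nat.testBit_two_pow_sub_one, hj]
  · have hij : i ≠ j := by omega
    simp [Nat.testBit_two_pow_sub_one, hij, Nat.not_lt.mpr hj]

-- A's per-character step, the shared shape of both programs
def somethingStep (p : List Char) (f : Int) (c : Char) : Int :=
  match PySem.List.index? p c with
  | some i => PySem.Int.bor f (2 ^ i)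
  | none => f

theorem step_full (p : List Char) (c : Char) :
    somethingStep p ((2 : Int) ^ p.length - 1) c = 2 ^ p.length - 1 := by
  unfold somethingStep
  cases hidx : PySem.List.index? p c with
  | none => rfl
  | some i =>
      obtain ⟨hk, -, -⟩ := PySem.List.getElem_of_index?_eq_some hidx
      exact bor_full _ _ hk

theorem foldl_step_full (p : List Char) (w : List Char) :
    w.foldl (somethingStep p) ((2 : Int) ^ p.length - 1) = 2 ^ p.length - 1 := by
  induction w with
  | nil => rfl
  | cons c rest ih => rw [List.foldl_cons, step_full, ih]

theorem goA_eq_fold (p : List Char) (w : List Char) (f : Int) :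
    somethingGoA p w f = decide (w.foldl (somethingStep p) f = 2 ^ p.length - 1) := by
  induction w generalizing f with
  | nil =>
      unfold somethingGoA
      by_cases hf : f = 2 ^ p.length - 1 <;> simp [hf]
  | cons c rest ih =>
      unfold somethingGoA
      by_cases hf : f = 2 ^ p.length - 1
      · subst hf
        simp only [if_true, List.foldl_cons, step_full, foldl_step_full]
        simp
      · simp only [hf, if_false]
        have hstep :
            (match PySem.List.index? p c with
             | some i => somethingGoA p rest (PySem.Int.bor f (2 ^ i))
             | none => somethingGoA p rest f)
            = somethingGoA p rest (somethingStep p f c) := by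
          unfold somethingStep
          cases PySem.List.index? p c <;> rfl
        rw [hstep, ih, List.foldl_cons]

theorem alt_eq_fold (pattern word : String) (flags : Int) :
    something_ish_alt pattern word flags
      = decide (word.toList.foldl (somethingStep pattern.toList) flags
          = 2 ^ pattern.toList.length - 1) := by
  unfold something_ish_alt
  have hfun :
      (fun (m : Int) (c : Char) =>
        match (somethingFirstB pattern.toList).get? c with
        | some i => PySem.Int.bor m (2 ^ i.toNat)
        | none => m)
      = somethingStep pattern.toList := by
    funext m c
    rw [somethingFirst_get]
    unfold somethingStep
    cases PySem.List.index? pattern.toList c <;> simp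
  simp only [hfun]

-- ===== VERDICT (by name: the statement is the Claim_ definition above) =====
theorem something_ish_spec : Claim_equal_something_ish := by
  intro pattern word flags _
  unfold Spec_something_ish something_ish
  rw [goA_eq_fold, alt_eq_fold]
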